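-- pv_equiv track=rewrite | github.com/Adailton31/Curso-Python-3 | 10_-_09_-_2023.py | numeros_terminados_em
-- ===== SOURCE A (Python) =====
-- def numeros_terminados_em(n, max_num):
--     numeros = []
--     for i in range(max_num + 1):  # Gere números de 0 a max_num
--         if i % 10 == n:  # Verifique se o número termina com o valor desejado
--             numeros.append(i)
--             if len(numeros) == 6:  # Se encontrou 2 números que terminam em n, pare
--                 break
--     return numeros
-- ===== SOURCE B (Python) =====
-- def numeros_terminados_em(n, max_num):
--     if 0 <= n <= 9:
--         return [n + 10 * k for k in range(6) if n + 10 * k <= max_num]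
--     return []
-- ===== Notes on version B (the rewrite author's own statement) =====
-- stated objective: faster
-- what changed: Instead of scanning every integer from 0 to max_num and testing its last digit, B generates the arithmetic progression n, n+10, ..., n+50 directly (at most 6 candidates) and keeps those <= max_num, returning [] when n is not a digit 0-9.
import Mathlib
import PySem

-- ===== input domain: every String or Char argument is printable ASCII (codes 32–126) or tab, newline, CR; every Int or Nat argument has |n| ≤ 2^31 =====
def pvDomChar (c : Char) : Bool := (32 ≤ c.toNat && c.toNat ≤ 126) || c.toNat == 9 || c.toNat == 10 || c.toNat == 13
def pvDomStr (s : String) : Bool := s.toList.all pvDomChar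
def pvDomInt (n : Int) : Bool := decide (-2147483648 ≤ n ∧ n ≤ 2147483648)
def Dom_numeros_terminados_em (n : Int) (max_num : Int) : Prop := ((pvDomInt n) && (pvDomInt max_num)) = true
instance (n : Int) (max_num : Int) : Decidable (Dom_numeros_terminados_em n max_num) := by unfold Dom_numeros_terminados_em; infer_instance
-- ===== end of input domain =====

-- B replaces A's linear scan of 0..max_num by directly generating the ≤6-term arithmetic progression (faster, O(1)).

-- ===== PORT A =====
-- the for-loop with break: recursion over the range list, stopping once 6 numbers are collected
def pvGoA (n : Int) : List Int → List Int → List Int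
  | [], nums => nums
  | i :: rest, nums =>
    if PySem.Int.mod i 10 = n then
      if (nums ++ [i]).length = 6 then nums ++ [i] else pvGoA n rest (nums ++ [i])
    else pvGoA n rest nums

def numeros_terminados_em (n : Int) (max_num : Int) : List Int :=
  pvGoA n (PySem.List.pyRange 0 (max_num + 1) 1) []

-- ===== PORT B =====
def numeros_terminados_em_alt (n : Int) (max_num : Int) : List Int :=
  if 0 ≤ n ∧ n ≤ 9 then
    ((PySem.List.pyRange 0 6 1).filter (fun k => decide (n + 10 * k ≤ max_num))).map
      (fun k => n + 10 * k)
  else []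

-- ===== PRECONDITION & SPEC =====
def Spec_numeros_terminados_em (n : Int) (max_num : Int) (out : List Int) : Prop := out = numeros_terminados_em_alt n max_num
instance (n : Int) (max_num : Int) (out : List Int) : Decidable (Spec_numeros_terminados_em n max_num out) := by unfold Spec_numeros_terminados_em; infer_instance

-- ===== CLAIM (what is proved, stated in full; the proofs are below) =====
def Claim_equal_numeros_terminados_em : Prop := ∀ (n : Int) (max_num : Int), Dom_numeros_terminados_em n max_num → Spec_numeros_terminados_em n max_num (numeros_terminados_em n max_num)

-- ===== LEMMAS AND PROOFS =====

-- the loop with break returns the accumulator plus the first (6 - |acc|) matches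
theorem pvGoA_eq (n : Int) (l : List Int) : ∀ (nums : List Int), nums.length < 6 →
    pvGoA n l nums = nums ++ (l.filter (fun i => decide (i % 10 = n))).take (6 - nums.length) := by
  induction l with
  | nil => intro nums _; simp [pvGoA]
  | cons i rest ih =>
    intro nums h
    have hmod : PySem.Int.mod i 10 = i % 10 := PySem.Int.mod_eq_emod_of_pos (by norm_num)
    by_cases hp : i % 10 = n
    · have hp' : PySem.Int.mod i 10 = n := by rw [hmod]; exact hp
      by_cases h6 : (nums ++ [i]).length = 6
      · have hlen : nums.length = 5 := by simp at h6; omega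
        simp [pvGoA, hp, h6, hlen]
      · have hlt : (nums ++ [i]).length < 6 := by simp at h6 ⊢; omega
        rw [pvGoA, if_pos hp', if_neg h6, ih _ hlt]
        have h1 : 6 - nums.length = (6 - (nums ++ [i]).length) + 1 := by simp; omega
        simp [hp, h1, List.take_succ_cons]
    · have hp' : ¬ PySem.Int.mod i 10 = n := by rw [hmod]; exact hp
      rw [pvGoA, if_neg hp', ih _ h]
      simp [hp]

theorem filt_of_big (n : Int) (hn : ¬ (0 ≤ n ∧ n ≤ 9)) (a b : Int) :
    (PySem.List.pyRange a b 1).filter (fun i => decide (i % 10 = n)) = [] := by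
  rw [List.filter_eq_nil_iff]
  intro i _
  have h1 := Int.emod_nonneg i (by norm_num : (10:Int) ≠ 0)
  have h2 := Int.emod_lt_of_pos i (by norm_num : (0:Int) < 10)
  simp only [decide_eq_true_eq]
  omega

theorem filt_of_digit (n : Int) (hn0 : 0 ≤ n) (hn9 : n ≤ 9) (M : Nat) :
    (PySem.List.pyRange 0 (M : Int) 1).filter (fun i => decide (i % 10 = n)) =
      (List.range ((M + 9 - n.toNat) / 10)).map (fun k : Nat => n + 10 * (k : Int)) := by
  induction M with
  | zero =>
    have h0 : (9 - n.toNat) / 10 = 0 := by omega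
    simp [PySem.List.pyRange_one_eq_nil, h0]
  | succ M ih =>
    have hM : (0:Int) ≤ (M:Int) := by positivity
    have hcast : ((M + 1 : Nat) : Int) = (M : Int) + 1 := by push_cast; ring
    rw [hcast, PySem.List.pyRange_one_succ_right hM, List.filter_append, ih]
    have hmod : ((M % 10 : Nat) : Int) = (M : Int) % 10 := by push_cast; ring
    have hne : ((n.toNat : Int)) = n := Int.toNat_of_nonneg hn0
    by_cases h : M % 10 = n.toNat
    · have hcnt : (M + 1 + 9 - n.toNat) / 10 = (M + 9 - n.toNat) / 10 + 1 := by omega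
      have hval : n + 10 * (((M + 9 - n.toNat) / 10 : Nat) : Int) = (M : Int) := by
        have hnat : n.toNat + 10 * ((M + 9 - n.toNat) / 10) = M := by omega
        rw [← hne]
        exact_mod_cast congrArg (Nat.cast : Nat → Int) hnat
      have hpm : (M : Int) % 10 = n := by rw [← hmod, h, hne]
      have hsing : List.filter (fun i => decide (i % 10 = n)) [(M : Int)] = [(M : Int)] := by
        simp [hpm]
      rw [hsing, hcnt, List.range_succ, List.map_append, List.map_singleton, hval]
    · have hcnt : (M + 1 + 9 - n.toNat) / 10 = (M + 9 - n.toNat) / 10 := by omega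
      have hpm : ¬ ((M : Int) % 10 = n) := by
        rw [← hmod, ← hne]
        intro hc
        exact h (by exact_mod_cast hc)
      simp [hpm, hcnt]

theorem filter_range6 (c : Nat) :
    (List.range 6).filter (fun k => decide (k < c)) = List.range (min 6 c) := by
  by_cases h : 6 ≤ c
  · have h6 : min 6 c = 6 := by omega
    rw [h6, List.filter_eq_self.mpr]
    intro a ha
    simp only [List.mem_range] at ha
    simp; omega
  · have hc : c < 6 := by omega
    interval_cases c <;> decide

-- ===== VERDICT (by name: the statement is the Claim_ definition above) =====
theorem numeros_terminados_em_spec : Claim_equal_numeros_terminados_em := by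
  unfold Claim_equal_numeros_terminados_em
  intro n m _
  unfold Spec_numeros_terminados_em numeros_terminados_em numeros_terminados_em_alt
  rw [pvGoA_eq n _ [] (by simp)]
  by_cases hn : 0 ≤ n ∧ n ≤ 9
  · obtain ⟨hn0, hn9⟩ := hn
    rw [if_pos ⟨hn0, hn9⟩]
    by_cases hm : m + 1 ≤ 0
    · rw [PySem.List.pyRange_one_eq_nil hm]
      have hB : (PySem.List.pyRange 0 6 1).filter (fun k => decide (n + 10 * k ≤ m)) = [] := by
        rw [List.filter_eq_nil_iff]
        intro k hk
        rw [PySem.List.mem_pyRange_one] at hk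
        simp only [decide_eq_true_eq]
        omega
      rw [hB]
      simp
    · rw [not_le] at hm
      have hMc : (((m + 1).toNat : Nat) : Int) = m + 1 := Int.toNat_of_nonneg (by omega)
      rw [← hMc, filt_of_digit n hn0 hn9 ((m + 1).toNat)]
      set M : Nat := (m + 1).toNat with hMdef
      set c : Nat := (M + 9 - n.toNat) / 10 with hcdef
      rw [← List.map_take, List.take_range]
      rw [PySem.List.pyRange_one]
      simp only [List.filter_map, List.map_map, Function.comp_def, zero_add]
      have h6 : ((6 : Int) - 0).toNat = 6 := by decide
      rw [h6]
      have hpred : (fun k : Nat => decide (n + 10 * (k : Int) ≤ m)) =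
          (fun k : Nat => decide (k < c)) := by
        funext k
        simp only [decide_eq_decide]
        have hne : ((n.toNat : Int)) = n := Int.toNat_of_nonneg hn0
        constructor
        · intro h
          have hint : (n.toNat : Int) + 10 * (k : Int) + 1 ≤ (M : Int) := by rw [hne]; omega
          have hnat : n.toNat + 10 * k + 1 ≤ M := by exact_mod_cast hint
          omega
        · intro h
          have hnat : n.toNat + 10 * k + 1 ≤ M := by omega
          have hint : (n.toNat : Int) + 10 * (k : Int) + 1 ≤ (M : Int) := by exact_mod_cast hnat
          rw [hne] at hint; omega
      rw [hpred, filter_range6]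
      simp
  · rw [if_neg hn, filt_of_big n hn]
    simp
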